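-- pv_equiv track=rewrite | github.com/cry999/AtCoder | beginner-contest/069/D.py | grid_coloring
-- ===== SOURCE A (Python) =====
-- def grid_coloring(H: int, W: int, N: int, A: list)->list:
--     h, w = 0, 0
--     dw = 1
--     ret = [[''] * W for _ in range(H)]
--     for i, a in enumerate(A):
--         for _ in range(a):
--             ret[h][w] = str(i+1)
--             if w + dw == W:
--                 h += 1
--                 dw = -1
--             elif w + dw == -1:
--                 h += 1
--                 dw = 1
--             else:
--                 w += dw
--     return ret
-- ===== SOURCE B (Python) =====
-- def grid_coloring(H: int, W: int, N: int, A: list) -> list: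
--     colors = []
--     for i, a in enumerate(A):
--         colors += [str(i + 1)] * a
--     ret = [[''] * W for _ in range(H)]
--     for k, c in enumerate(colors):
--         row = k // W
--         p = k % W
--         col = p if row % 2 == 0 else W - 1 - p
--         ret[row][col] = c
--     return ret
-- ===== Notes on version B (the rewrite author's own statement) =====
-- stated objective: simpler
-- what changed: B replaces A's direction-flipping cursor state machine (h, w, dw updated per cell) by first flattening the counts into a color list and then assigning each index k directly to its snake position (row k//W, column k%W or W-1-k%W by row parity).
import Mathlib
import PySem

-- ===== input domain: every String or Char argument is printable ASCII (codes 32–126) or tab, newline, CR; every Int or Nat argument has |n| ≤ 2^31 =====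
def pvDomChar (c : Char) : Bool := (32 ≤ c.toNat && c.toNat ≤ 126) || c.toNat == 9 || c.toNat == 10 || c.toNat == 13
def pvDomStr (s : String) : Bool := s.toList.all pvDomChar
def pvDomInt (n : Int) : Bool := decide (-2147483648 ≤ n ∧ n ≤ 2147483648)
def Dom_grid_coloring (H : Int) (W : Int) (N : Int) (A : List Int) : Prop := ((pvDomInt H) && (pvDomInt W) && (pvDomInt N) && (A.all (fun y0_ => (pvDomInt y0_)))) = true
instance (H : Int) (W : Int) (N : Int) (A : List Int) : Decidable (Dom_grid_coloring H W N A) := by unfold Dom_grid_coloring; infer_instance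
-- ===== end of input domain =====

-- B replaces A's direction-flipping cursor state machine by a flat color stream assigned
-- through a direct index → snake-position mapping (objective: simpler decomposition).

-- shared cell write 'ret[h][w] = v'; exact for 0 ≤ h, 0 ≤ w (the only indices either
-- program reaches inside Pre_); out of range Python raises (excluded by Pre_)
def pvSetCell (g : List (List String)) (h w : Int) (v : String) : List (List String) :=
  g.modify h.toNat (fun row => row.set w.toNat v)

-- ===== PORT A =====
-- one iteration of A's inner loop body on the state (h, w, dw, ret)
def pvStepA (W : Int) (v : String) (st : Int × Int × Int × List (List String)) :
    Int × Int × Int × List (List String) :=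
  match st with
  | (h, w, dw, ret0) =>
    let ret := pvSetCell ret0 h w v
    if w + dw = W then (h + 1, w, -1, ret)
    else if w + dw = -1 then (h + 1, w, 1, ret)
    else (h, w + dw, dw, ret)

def grid_coloring (H : Int) (W : Int) (N : Int) (A : List Int) : List (List String) :=
  let init := List.replicate H.toNat (List.replicate W.toNat "")
  ((PySem.List.enumerate A 0).foldl
    (fun st p =>
      (PySem.List.pyRange 0 p.2 1).foldl
        (fun st _ => pvStepA W (PySem.Int.toStr (p.1 + 1)) st) st)
    ((0 : Int), (0 : Int), (1 : Int), init)).2.2.2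

-- ===== PORT B =====
-- one iteration of B's assignment loop: ret[k//W][p or W-1-p] = c
def pvAssignB (W : Int) (g : List (List String)) (k : Int) (c : String) : List (List String) :=
  let row := PySem.Int.floordiv k W
  let p := PySem.Int.mod k W
  let col := if PySem.Int.mod row 2 = 0 then p else W - 1 - p
  pvSetCell g row col c

def grid_coloring_alt (H : Int) (W : Int) (N : Int) (A : List Int) : List (List String) :=
  let colors := (PySem.List.enumerate A 0).foldl
    (fun acc p => acc ++ PySem.List.pyRepeat [PySem.Int.toStr (p.1 + 1)] p.2) []
  let init := List.replicate H.toNat (List.replicate W.toNat "")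
  (PySem.List.enumerate colors 0).foldl (fun g p => pvAssignB W g p.1 p.2) init

-- ===== PRECONDITION & SPEC =====
-- Pre_ is exactly where Python A returns: either no cell is ever written (all counts ≤ 0),
-- or W ≥ 1 and the number of writes Σ max(aᵢ,0) fits in the H×W grid; otherwise A raises IndexError.
def Pre_grid_coloring (H : Int) (W : Int) (N : Int) (A : List Int) : Prop :=
  (A.map (fun a => max a 0)).sum = 0 ∨
  (1 ≤ W ∧ (A.map (fun a => max a 0)).sum ≤ H * W)
instance (H : Int) (W : Int) (N : Int) (A : List Int) : Decidable (Pre_grid_coloring H W N A) := by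
  unfold Pre_grid_coloring; infer_instance
def pvWitness_grid_coloring : Int × Int × Int × List Int := (2, 3, 2, [4, 2])

def Spec_grid_coloring (H : Int) (W : Int) (N : Int) (A : List Int) (out : List (List String)) : Prop := out = grid_coloring_alt H W N A
instance (H : Int) (W : Int) (N : Int) (A : List Int) (out : List (List String)) : Decidable (Spec_grid_coloring H W N A out) := by unfold Spec_grid_coloring; infer_instance

-- ===== CLAIM (what is proved, stated in full; the proofs are below) =====
def Claim_equal_grid_coloring : Prop := ∀ (H : Int) (W : Int) (N : Int) (A : List Int), Dom_grid_coloring H W N A → Pre_grid_coloring H W N A → Spec_grid_coloring H W N A (grid_coloring H W N A)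

-- ===== LEMMAS AND PROOFS =====

-- the flat color stream both programs effectively process
def pvColors (A : List Int) : List String :=
  (PySem.List.enumerate A 0).flatMap
    (fun p => List.replicate p.2.toNat (PySem.Int.toStr (p.1 + 1)))

-- snake column and direction after q completed rows, r cells into the row
def pvColA (W q r : Int) : Int := if q % 2 = 0 then r else W - 1 - r
def pvDirA (q : Int) : Int := if q % 2 = 0 then 1 else -1

theorem pv_foldl_ignore {α β : Type} (f : α → α) (l : List β) (s : α) :
    l.foldl (fun a _ => f a) s = f^[l.length] s := by
  induction l generalizing s with
  | nil => rfl
  | cons x xs ih => simp [List.foldl_cons, ih, Function.iterate_succ_apply]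

theorem pv_foldl_replicate {α β : Type} (f : α → β → α) (n : Nat) (c : β) (s : α) :
    (List.replicate n c).foldl f s = (fun a => f a c)^[n] s := by
  induction n generalizing s with
  | zero => rfl
  | succ n ih => simp [List.replicate_succ, List.foldl_cons, ih, Function.iterate_succ_apply]

theorem pv_range_fold_eq_replicate (W a : Int) (v : String)
    (st : Int × Int × Int × List (List String)) :
    (PySem.List.pyRange 0 a 1).foldl (fun st _ => pvStepA W v st) st
      = (List.replicate a.toNat v).foldl (fun st c => pvStepA W c st) st := by
  rw [pv_foldl_ignore, pv_foldl_replicate, PySem.List.length_pyRange_one]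
  norm_num

theorem pv_A_fold_flat (W : Int) (A : List Int) : ∀ (s : Int)
    (st : Int × Int × Int × List (List String)),
    (PySem.List.enumerate A s).foldl
      (fun st p => (PySem.List.pyRange 0 p.2 1).foldl
        (fun st _ => pvStepA W (PySem.Int.toStr (p.1 + 1)) st) st) st
    = ((PySem.List.enumerate A s).flatMap
        (fun p => List.replicate p.2.toNat (PySem.Int.toStr (p.1 + 1)))).foldl
        (fun st c => pvStepA W c st) st := by
  induction A with
  | nil => intro s st; simp [PySem.List.enumerate_nil]
  | cons a A ih =>
    intro s st
    rw [PySem.List.enumerate_cons]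
    simp only [List.foldl_cons, List.flatMap_cons, List.foldl_append]
    rw [pv_range_fold_eq_replicate, ih]

theorem pv_fd_qr (W q r : Int) (h1 : 0 ≤ r) (h2 : r < W) :
    PySem.Int.floordiv (q * W + r) W = q := by
  rw [PySem.Int.floordiv_eq_iff_of_pos (by omega)]
  have e : (q + 1) * W = q * W + W := by ring
  constructor <;> [linarith; linarith [e]]

theorem pv_md_qr (W q r : Int) (h1 : 0 ≤ r) (h2 : r < W) :
    PySem.Int.mod (q * W + r) W = r := by
  rw [PySem.Int.mod_eq_emod_of_pos (by omega), Int.add_comm, mul_comm,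
    Int.add_mul_emod_self_left, Int.emod_eq_of_lt h1 h2]

theorem pv_assign_eq (W q r : Int) (g : List (List String)) (c : String)
    (h1 : 0 ≤ r) (h2 : r < W) :
    pvAssignB W g (q * W + r) c = pvSetCell g q (pvColA W q r) c := by
  unfold pvAssignB pvColA
  rw [pv_fd_qr W q r h1 h2, pv_md_qr W q r h1 h2]
  simp only [PySem.Int.mod_eq_emod_of_pos (show (0:Int) < 2 by norm_num)]

theorem pv_main (W : Int) (hW : 1 ≤ W) (cs : List String) : ∀ (q r : Int)
    (g : List (List String)), 0 ≤ q → 0 ≤ r → r < W →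
    (cs.foldl (fun st c => pvStepA W c st) (q, pvColA W q r, pvDirA q, g)).2.2.2
    = (PySem.List.enumerate cs (q * W + r)).foldl (fun g p => pvAssignB W g p.1 p.2) g := by
  induction cs with
  | nil => intro q r g _ _ _; simp [PySem.List.enumerate_nil]
  | cons c cs ih =>
    intro q r g hq hr hrW
    rw [PySem.List.enumerate_cons]
    simp only [List.foldl_cons]
    rw [pv_assign_eq W q r g c hr hrW]
    have e1 : (q + 1) * W = q * W + W := by ring
    rcases Int.emod_two_eq q with he | ho
    · -- even row: moving right, at column r
      have hc : pvColA W q r = r := by simp [pvColA, he]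
      have hd : pvDirA q = 1 := by simp [pvDirA, he]
      rw [hc, hd]
      by_cases hb : r + 1 = W
      · -- end of row: step to row q+1, direction flips
        have hst : pvStepA W c (q, r, 1, g)
            = (q + 1, pvColA W (q + 1) 0, pvDirA (q + 1), pvSetCell g q r c) := by
          have h5 : ¬ ((q + 1) % 2 = 0) := by omega
          have h6 : W - 1 - 0 = r := by omega
          simp [pvStepA, pvColA, pvDirA, hb, h5, h6]
        rw [hst, ih (q + 1) 0 _ (by omega) (by omega) (by omega)]
        rw [show q * W + r + 1 = (q + 1) * W + 0 by linarith [e1]]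
      · have hst : pvStepA W c (q, r, 1, g)
            = (q, pvColA W q (r + 1), pvDirA q, pvSetCell g q r c) := by
          have h2 : ¬ (r + 1 = -1) := by omega
          simp [pvStepA, pvColA, pvDirA, hb, h2, he]
        rw [hst, ih q (r + 1) _ hq (by omega) (by omega)]
        rw [show q * W + r + 1 = q * W + (r + 1) by ring]
    · -- odd row: moving left, at column W-1-r
      have hc : pvColA W q r = W - 1 - r := by simp [pvColA, ho]
      have hd : pvDirA q = -1 := by simp [pvDirA, ho]
      rw [hc, hd]
      by_cases hb : r + 1 = W
      · have hst : pvStepA W c (q, W - 1 - r, -1, g)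
            = (q + 1, pvColA W (q + 1) 0, pvDirA (q + 1), pvSetCell g q (W - 1 - r) c) := by
          have h1 : ¬ (W - 1 - r + -1 = W) := by omega
          have h2 : W - 1 - r + -1 = -1 := by omega
          have h3 : (q + 1) % 2 = 0 := by omega
          have h4 : W - 1 - r = 0 := by omega
          simp [pvStepA, pvColA, pvDirA, h3, h4]
          omega
        rw [hst, ih (q + 1) 0 _ (by omega) (by omega) (by omega)]
        rw [show q * W + r + 1 = (q + 1) * W + 0 by linarith [e1]]
      · have hst : pvStepA W c (q, W - 1 - r, -1, g)
            = (q, pvColA W q (r + 1), pvDirA q, pvSetCell g q (W - 1 - r) c) := by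
          have h1 : ¬ (W - 1 - r + -1 = W) := by omega
          have h2 : ¬ (W - 1 - r + -1 = -1) := by omega
          have h8 : ¬ (q % 2 = 0) := by omega
          simp [pvStepA, pvColA, pvDirA, h1, h2, h8]
          omega
        rw [hst, ih q (r + 1) _ hq (by omega) (by omega)]
        rw [show q * W + r + 1 = q * W + (r + 1) by ring]

theorem pv_sum_zero_all_nonpos (A : List Int)
    (h : (A.map (fun a => max a 0)).sum = 0) : ∀ a ∈ A, a ≤ 0 := by
  induction A with
  | nil => simp
  | cons x A ih =>
    simp only [List.map_cons, List.sum_cons] at h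
    have hrest : 0 ≤ (A.map (fun a => max a 0)).sum := by
      apply List.sum_nonneg
      intro y hy
      simp only [List.mem_map] at hy
      obtain ⟨z, _, rfl⟩ := hy
      exact le_max_right z 0
    intro a ha
    rcases List.mem_cons.mp ha with rfl | ha'
    · omega
    · exact ih (by omega) a ha'

theorem pv_colors_nil (A : List Int)
    (h : (A.map (fun a => max a 0)).sum = 0) : pvColors A = [] := by
  unfold pvColors
  rw [List.flatMap_eq_nil_iff]
  intro p hp
  have hmem : p.2 ∈ A := by
    have := PySem.List.map_snd_enumerate A (0 : Int)
    rw [← this]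
    exact List.mem_map_of_mem hp
  have : p.2 ≤ 0 := pv_sum_zero_all_nonpos A h p.2 hmem
  simp [Int.toNat_of_nonpos this]

-- ===== VERDICT (by name: the statement is the Claim_ definition above) =====
theorem grid_coloring_spec : Claim_equal_grid_coloring := by
  intro H W N A _ hPre
  simp only [Spec_grid_coloring, grid_coloring, grid_coloring_alt]
  rw [pv_A_fold_flat, PySem.List.foldl_append_eq_flatMap]
  simp only [PySem.List.pyRepeat_singleton, List.nil_append]
  rw [show ((PySem.List.enumerate A 0).flatMap
        (fun p => List.replicate p.2.toNat (PySem.Int.toStr (p.1 + 1)))) = pvColors A from rfl]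
  by_cases hW : 1 ≤ W
  · have h0 : ((0 : Int), (0 : Int), (1 : Int),
        List.replicate H.toNat (List.replicate W.toNat ""))
        = ((0 : Int), pvColA W 0 0, pvDirA 0,
           List.replicate H.toNat (List.replicate W.toNat "")) := by
      simp [pvColA, pvDirA]
    rw [h0, pv_main W hW (pvColors A) 0 0 _ le_rfl le_rfl (by omega)]
    norm_num
  · have hz : (A.map (fun a => max a 0)).sum = 0 := by
      rcases hPre with h | ⟨h1, _⟩
      · exact h
      · exact absurd h1 hW
    rw [pv_colors_nil A hz]
    simp [PySem.List.enumerate_nil]
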